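-- pv_equiv track=rewrite | github.com/sashka-klass/IST_2026_spring | homework-02/caesar.py | caesar_breaker_brute_force
-- ===== SOURCE A (Python) =====
-- import typing as tp
--
-- def decrypt_caesar(ciphertext: str, shift: int = 3) -> str:
--     """
--     Decrypts a ciphertext using a Caesar cipher.
--
--     >>> decrypt_caesar("SBWKRQ")
--     'PYTHON'
--     >>> decrypt_caesar("sbwkrq")
--     'python'
--     >>> decrypt_caesar("Sbwkrq3.6")
--     'Python3.6'
--     >>> decrypt_caesar("")
--     ''
--     """
--     plaintext = ""
--     for char in ciphertext:
--         if char.isalpha():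
--             if char.isupper():
--                 start = ord('A')
--             else:
--                 start = ord('a')
--             # Дешифруем: вычитаем сдвиг
--             shifted_char = chr((ord(char) - start - shift) % 26 + start)
--             plaintext += shifted_char
--         else:
--             plaintext += char
--     return plaintext
--
-- def caesar_breaker_brute_force(ciphertext: str, dictionary: tp.Set[str]) -> int:
--     """
--     Brute force breaking a Caesar cipher.
--     Пробует все возможные сдвиги (0-25) и возвращает тот,
--     при котором больше всего слов из расшифрованного текста
--     есть в словаре.
--
--     >>> caesar_breaker_brute_force("sbwkrq", {"python", "java", "c++"})
--     3
--     """
--     best_shift = 0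
--     best_count = 0
--
--     # Пробуем все возможные сдвиги от 0 до 25
--     for shift in range(26):
--         # Расшифровываем текст с текущим сдвигом
--         decrypted = decrypt_caesar(ciphertext, shift)
--
--         # Разбиваем расшифрованный текст на слова
--         # (убираем знаки препинания, оставляем только буквы)
--         words = []
--         current_word = ""
--         for char in decrypted:
--             if char.isalpha():
--                 current_word += char.lower()
--             else:
--                 if current_word:
--                     words.append(current_word)
--                     current_word = ""
--         if current_word:
--             words.append(current_word)
--
--         # Считаем, сколько слов из расшифрованного текста есть в словаре
--         count = sum(1 for word in words if word in dictionary)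
--
--         # Если нашли больше совпадений, запоминаем этот сдвиг
--         if count > best_count:
--             best_count = count
--             best_shift = shift
--
--     return best_shift
-- ===== SOURCE B (Python) =====
-- import typing as tp
--
-- def caesar_breaker_brute_force(ciphertext: str, dictionary: tp.Set[str]) -> int:
--     # Tokenize once: shifting never changes which chars are alphabetic, so word
--     # boundaries are the same for every shift.  Then count matches per shift in
--     # one pass over the words, and finally scan the 26 counters.
--     words = []
--     cur = []
--     for ch in ciphertext:
--         if ch.isalpha():
--             cur.append(ch.lower())
--         else:
--             if cur:
--                 words.append("".join(cur))
--                 cur = []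
--     if cur:
--         words.append("".join(cur))
--
--     counts = {}
--     for w in words:
--         for shift in range(26):
--             dec = "".join(chr((ord(c) - 97 - shift) % 26 + 97) for c in w)
--             if dec in dictionary:
--                 counts[shift] = counts.get(shift, 0) + 1
--
--     best_shift = 0
--     best_count = 0
--     for shift in range(26):
--         c = counts.get(shift, 0)
--         if c > best_count:
--             best_count = c
--             best_shift = shift
--     return best_shift
-- ===== Notes on version B (the rewrite author's own statement) =====
-- stated objective: faster
-- what changed: A re-decrypts and re-tokenizes the whole text for each of the 26 shifts; B tokenizes the text once (word boundaries are shift-invariant), counts dictionary hits per shift in a single pass over the words into a counter dict, and then scans the 26 counters for the lowest best shift.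
import Mathlib
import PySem

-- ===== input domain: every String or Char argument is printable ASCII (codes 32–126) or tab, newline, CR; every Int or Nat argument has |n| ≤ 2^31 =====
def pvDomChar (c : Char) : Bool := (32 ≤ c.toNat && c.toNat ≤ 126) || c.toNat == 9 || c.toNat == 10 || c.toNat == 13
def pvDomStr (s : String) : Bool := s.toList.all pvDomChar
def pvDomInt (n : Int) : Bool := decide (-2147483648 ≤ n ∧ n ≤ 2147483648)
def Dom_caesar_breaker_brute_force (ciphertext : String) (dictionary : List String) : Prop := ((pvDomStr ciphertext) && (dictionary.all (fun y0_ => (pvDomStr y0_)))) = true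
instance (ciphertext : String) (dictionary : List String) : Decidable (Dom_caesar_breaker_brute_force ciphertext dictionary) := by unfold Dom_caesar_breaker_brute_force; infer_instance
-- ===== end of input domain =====

-- B tokenizes the text once (word boundaries are shift-invariant), counts dictionary hits
-- per shift in one pass over the words, then scans the 26 counters; A re-decrypts and
-- re-tokenizes the whole text for every shift (objective: alternative decomposition).

-- ===== PORT A =====
-- per-character body of decrypt_caesar's loop (the if/else over isalpha/isupper)
def pvDecChar (shift : Int) (c : Char) : Char :=
  if PySem.Chars.isalpha c then
    let start : Int := if PySem.Chars.isupper c then 65 else 97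
    Char.ofNat (PySem.Int.mod ((c.toNat : Int) - start - shift) 26 + start).toNat
  else c

-- decrypt_caesar: plaintext built by appending char by char
def pvDecryptCaesar (cs : List Char) (shift : Int) : List Char :=
  cs.foldl (fun acc ch => acc ++ [pvDecChar shift ch]) []

-- the word-splitting loop body, verbatim identical Python code in A and B
def pvSplitStep (st : List (List Char) × List Char) (c : Char) : List (List Char) × List Char :=
  if PySem.Chars.isalpha c then (st.1, st.2 ++ [PySem.Chars.lowerChar c])
  else if st.2.isEmpty then st else (st.1 ++ [st.2], [])

def pvSplitWords (cs : List Char) : List (List Char) :=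
  let st := cs.foldl pvSplitStep ([], [])
  if st.2.isEmpty then st.1 else st.1 ++ [st.2]

def caesar_breaker_brute_force (ciphertext : String) (dictionary : List String) : Int :=
  let dict := dictionary.map String.toList
  let text := ciphertext.toList
  let st := (PySem.List.pyRange 0 26 1).foldl (fun (st : Int × Int) shift =>
      let decrypted := pvDecryptCaesar text shift
      let words := pvSplitWords decrypted
      let count : Int := (words.countP (fun w => dict.contains w) : Nat)
      if count > st.2 then (shift, count) else st) (0, 0)
  st.1

-- ===== PORT B =====
-- chr((ord(c) - 97 - shift) % 26 + 97) in B's per-word decryption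
def pvDecLowChar (shift : Int) (c : Char) : Char :=
  Char.ofNat (PySem.Int.mod ((c.toNat : Int) - 97 - shift) 26 + 97).toNat

def caesar_breaker_brute_force_alt (ciphertext : String) (dictionary : List String) : Int :=
  let dict := dictionary.map String.toList
  let words := pvSplitWords ciphertext.toList
  let counts : PySem.Dict Int Int := words.foldl (fun counts w =>
      (PySem.List.pyRange 0 26 1).foldl (fun counts shift =>
        if dict.contains (w.map (pvDecLowChar shift)) then counts.modify shift 0 (· + 1)
        else counts) counts) PySem.Dict.empty
  let st := (PySem.List.pyRange 0 26 1).foldl (fun (st : Int × Int) shift =>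
      let c := counts.getD shift 0
      if c > st.2 then (shift, c) else st) (0, 0)
  st.1

-- ===== PRECONDITION & SPEC =====
def Spec_caesar_breaker_brute_force (ciphertext : String) (dictionary : List String) (out : Int) : Prop := out = caesar_breaker_brute_force_alt ciphertext dictionary
instance (ciphertext : String) (dictionary : List String) (out : Int) : Decidable (Spec_caesar_breaker_brute_force ciphertext dictionary out) := by unfold Spec_caesar_breaker_brute_force; infer_instance

-- ===== CLAIM (what is proved, stated in full; the proofs are below) =====
def Claim_equal_caesar_breaker_brute_force : Prop := ∀ (ciphertext : String) (dictionary : List String), Dom_caesar_breaker_brute_force ciphertext dictionary → Spec_caesar_breaker_brute_force ciphertext dictionary (caesar_breaker_brute_force ciphertext dictionary)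

-- ===== LEMMAS AND PROOFS =====

theorem pv_toNat_ofNat (n : Nat) (h : n < 55296) : (Char.ofNat n).toNat = n := by
  rw [Char.toNat_ofNat, if_pos (Or.inl h)]

theorem pv_isupper_iff (c : Char) : PySem.Chars.isupper c = true ↔ 65 ≤ c.toNat ∧ c.toNat ≤ 90 := by
  simp [PySem.Chars.isupper, Char.le_def, UInt32.le_iff_toNat_le]

theorem pv_islower_iff (c : Char) : PySem.Chars.islower c = true ↔ 97 ≤ c.toNat ∧ c.toNat ≤ 122 := by
  simp [PySem.Chars.islower, Char.le_def, UInt32.le_iff_toNat_le]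

-- shifting a character never changes whether it is alphabetic
theorem pv_isalpha_decChar (s : Int) (c : Char) :
    PySem.Chars.isalpha (pvDecChar s c) = PySem.Chars.isalpha c := by
  unfold pvDecChar
  by_cases h : PySem.Chars.isalpha c = true
  · rw [if_pos h, h]
    simp only [PySem.Chars.isalpha, Bool.or_eq_true]
    by_cases hu : PySem.Chars.isupper c = true
    · simp only [hu, if_true]
      have hm0 := PySem.Int.mod_nonneg ((c.toNat : Int) - 65 - s) (by norm_num : (0:Int) < 26)
      have hm1 := PySem.Int.mod_lt ((c.toNat : Int) - 65 - s) (by norm_num : (0:Int) < 26)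
      have ht := pv_toNat_ofNat (PySem.Int.mod ((c.toNat : Int) - 65 - s) 26 + 65).toNat (by omega)
      exact Or.inl ((pv_isupper_iff _).2 ⟨by omega, by omega⟩)
    · simp only [hu, if_false, Bool.false_eq_true]
      have hm0 := PySem.Int.mod_nonneg ((c.toNat : Int) - 97 - s) (by norm_num : (0:Int) < 26)
      have hm1 := PySem.Int.mod_lt ((c.toNat : Int) - 97 - s) (by norm_num : (0:Int) < 26)
      have ht := pv_toNat_ofNat (PySem.Int.mod ((c.toNat : Int) - 97 - s) 26 + 97).toNat (by omega)
      exact Or.inr ((pv_islower_iff _).2 ⟨by omega, by omega⟩)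
  · rw [if_neg h]

-- lowering after decrypting = decrypting-in-lowercase after lowering (alphabetic chars)
theorem pv_lower_decChar (s : Int) (c : Char) (h : PySem.Chars.isalpha c = true) :
    PySem.Chars.lowerChar (pvDecChar s c) = pvDecLowChar s (PySem.Chars.lowerChar c) := by
  unfold pvDecChar pvDecLowChar PySem.Chars.lowerChar
  rw [if_pos h]
  by_cases hu : PySem.Chars.isupper c = true
  · simp only [hu, if_true]
    have hc := (pv_isupper_iff c).1 hu
    have hm0 := PySem.Int.mod_nonneg ((c.toNat : Int) - 65 - s) (by norm_num : (0:Int) < 26)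
    have hm1 := PySem.Int.mod_lt ((c.toNat : Int) - 65 - s) (by norm_num : (0:Int) < 26)
    have ht := pv_toNat_ofNat (PySem.Int.mod ((c.toNat : Int) - 65 - s) 26 + 65).toNat (by omega)
    rw [if_pos ((pv_isupper_iff _).2 ⟨by omega, by omega⟩)]
    have ht2 := pv_toNat_ofNat (c.toNat + 32) (by omega)
    rw [ht, ht2]
    have harg : ((c.toNat + 32 : Nat) : Int) - 97 - s = (c.toNat : Int) - 65 - s := by push_cast; ring
    rw [harg]
    congr 1
    omega
  · simp only [hu, if_false, Bool.false_eq_true]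
    have hl : PySem.Chars.islower c = true := by
      simp only [PySem.Chars.isalpha, Bool.or_eq_true] at h
      tauto
    have hc := (pv_islower_iff c).1 hl
    have hm0 := PySem.Int.mod_nonneg ((c.toNat : Int) - 97 - s) (by norm_num : (0:Int) < 26)
    have hm1 := PySem.Int.mod_lt ((c.toNat : Int) - 97 - s) (by norm_num : (0:Int) < 26)
    have ht := pv_toNat_ofNat (PySem.Int.mod ((c.toNat : Int) - 97 - s) 26 + 97).toNat (by omega)
    rw [if_neg (by rw [pv_isupper_iff]; omega)]

theorem pv_split_fold (s : Int) (cs : List Char) (ws : List (List Char)) (cur : List Char) :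
    (cs.map (pvDecChar s)).foldl pvSplitStep
        (ws.map (List.map (pvDecLowChar s)), cur.map (pvDecLowChar s))
      = ((cs.foldl pvSplitStep (ws, cur)).1.map (List.map (pvDecLowChar s)),
         (cs.foldl pvSplitStep (ws, cur)).2.map (pvDecLowChar s)) := by
  induction cs generalizing ws cur with
  | nil => rfl
  | cons c cs ih =>
    simp only [List.map_cons, List.foldl_cons]
    by_cases h : PySem.Chars.isalpha c = true
    · rw [show pvSplitStep (ws.map (List.map (pvDecLowChar s)), cur.map (pvDecLowChar s)) (pvDecChar s c)
            = (ws.map (List.map (pvDecLowChar s)), (cur ++ [PySem.Chars.lowerChar c]).map (pvDecLowChar s)) by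
          simp [pvSplitStep, pv_isalpha_decChar, h, pv_lower_decChar s c h]]
      rw [show pvSplitStep (ws, cur) c = (ws, cur ++ [PySem.Chars.lowerChar c]) by
          simp [pvSplitStep, h]]
      exact ih ws _
    · by_cases he : cur.isEmpty = true
      · rw [show pvSplitStep (ws.map (List.map (pvDecLowChar s)), cur.map (pvDecLowChar s)) (pvDecChar s c)
              = (ws.map (List.map (pvDecLowChar s)), cur.map (pvDecLowChar s)) by
            simp_all [pvSplitStep, pv_isalpha_decChar, List.isEmpty_iff]]
        rw [show pvSplitStep (ws, cur) c = (ws, cur) by simp [pvSplitStep, h, he]]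
        exact ih ws cur
      · rw [show pvSplitStep (ws.map (List.map (pvDecLowChar s)), cur.map (pvDecLowChar s)) (pvDecChar s c)
              = ((ws ++ [cur]).map (List.map (pvDecLowChar s)), ([] : List Char).map (pvDecLowChar s)) by
            simp_all [pvSplitStep, pv_isalpha_decChar, List.isEmpty_iff]]
        rw [show pvSplitStep (ws, cur) c = (ws ++ [cur], []) by simp [pvSplitStep, h, he]]
        exact ih (ws ++ [cur]) []

theorem pv_words_dec (s : Int) (cs : List Char) :
    pvSplitWords (cs.map (pvDecChar s)) = (pvSplitWords cs).map (List.map (pvDecLowChar s)) := by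
  unfold pvSplitWords
  have := pv_split_fold s cs [] []
  simp only [List.map_nil] at this
  rw [this]
  by_cases he : (cs.foldl pvSplitStep ([], [])).2.isEmpty = true
  · simp [List.isEmpty_iff.1 he]
  · simp_all [List.isEmpty_iff]

theorem pv_inner_getD (dict : List (List Char)) (w : List Char)
    (d : PySem.Dict Int Int) (shift : Int) (h : shift ∈ PySem.List.pyRange 0 26 1) :
    ((PySem.List.pyRange 0 26 1).foldl (fun counts sh =>
        if dict.contains (w.map (pvDecLowChar sh)) then counts.modify sh 0 (· + 1)
        else counts) d).getD shift 0
      = d.getD shift 0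
        + (if dict.contains (w.map (pvDecLowChar shift)) then 1 else 0) := by
  rw [← List.foldl_filter (f := fun (counts : PySem.Dict Int Int) sh => counts.modify sh 0 (· + 1))
        (p := fun sh => dict.contains (w.map (pvDecLowChar sh)))]
  rw [PySem.Dict.getD_foldl_modify_add_one]
  by_cases hc : dict.contains (w.map (pvDecLowChar shift)) = true
  · have hn : (PySem.List.pyRange 0 26 1).Nodup := by decide
    rw [List.count_filter (p := fun sh => dict.contains (List.map (pvDecLowChar sh) w)) hc, List.count_eq_one_of_mem hn h, if_pos hc]
    rfl
  · rw [List.count_eq_zero.2 (by simp only [List.mem_filter]; exact fun hmem => absurd hmem.2 hc), if_neg hc]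
    rfl

theorem pv_counts_getD (dict : List (List Char)) (words : List (List Char))
    (d0 : PySem.Dict Int Int) (shift : Int) (h : shift ∈ PySem.List.pyRange 0 26 1) :
    (words.foldl (fun counts w =>
        (PySem.List.pyRange 0 26 1).foldl (fun counts sh =>
          if dict.contains (w.map (pvDecLowChar sh)) then counts.modify sh 0 (· + 1)
          else counts) counts) d0).getD shift 0
      = d0.getD shift 0
        + (words.countP (fun w => dict.contains (w.map (pvDecLowChar shift))) : Nat) := by
  induction words generalizing d0 with
  | nil => simp
  | cons w ws ih =>
    rw [List.foldl_cons, ih, pv_inner_getD dict w d0 shift h, List.countP_cons]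
    by_cases hc : dict.contains (w.map (pvDecLowChar shift)) = true
    · simp only [hc, if_true]; push_cast; ring
    · simp only [Bool.not_eq_true] at hc
      simp only [hc, Bool.false_eq_true, if_false]; push_cast; ring

-- ===== VERDICT (by name: the statement is the Claim_ definition above) =====
theorem caesar_breaker_brute_force_spec : Claim_equal_caesar_breaker_brute_force := by
  intro ciphertext dictionary _
  unfold Spec_caesar_breaker_brute_force
  unfold caesar_breaker_brute_force caesar_breaker_brute_force_alt
  dsimp only
  refine congrArg Prod.fst ?_
  apply PySem.List.foldl_congr_mem
  intro acc shift hmem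
  dsimp only
  have hcount : ((pvSplitWords (pvDecryptCaesar ciphertext.toList shift)).countP
        (fun w => (dictionary.map String.toList).contains w)
      = (pvSplitWords ciphertext.toList).countP
        (fun w => (dictionary.map String.toList).contains (w.map (pvDecLowChar shift)))) := by
    have hdec : pvDecryptCaesar ciphertext.toList shift = ciphertext.toList.map (pvDecChar shift) := by
      unfold pvDecryptCaesar
      rw [PySem.List.foldl_append_singleton_eq_map]
      rfl
    rw [hdec, pv_words_dec, List.countP_map]
    rfl
  have hgetD : (((pvSplitWords ciphertext.toList).foldl (fun (counts : PySem.Dict Int Int) w =>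
      (PySem.List.pyRange 0 26 1).foldl (fun counts sh =>
        if (dictionary.map String.toList).contains (w.map (pvDecLowChar sh)) then counts.modify sh 0 (· + 1)
        else counts) counts) PySem.Dict.empty).getD shift 0
      = (((pvSplitWords ciphertext.toList).countP
        (fun w => (dictionary.map String.toList).contains (w.map (pvDecLowChar shift))) : Nat) : Int)) := by
    have h2 := pv_counts_getD (dictionary.map String.toList) (pvSplitWords ciphertext.toList) PySem.Dict.empty shift hmem
    rw [h2]
    simp [PySem.Dict.getD, PySem.Dict.empty, PySem.Dict.get?]
  rw [hgetD, ← hcount]
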